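-- pv_equiv track=rewrite | github.com/sumitgaur/leetcode- | codes/mycode/velox.py | StringChallenge
-- ===== SOURCE A (Python) =====
-- def StringChallenge(strParam):
--     def check(s):
--         digits = 0
--         for a, b in zip(s, s[1:]):
--             if a.isdigit() and b.isdigit():
--                 return False
--             if a.isdigit():
--                 digits += 1
--             if digits > 3:
--                 return False
--         return True
--
--     return all(map(check, strParam.split(" ")))
-- ===== SOURCE B (Python) =====
-- def StringChallenge(strParam):
--     def valid(w):
--         if any(a.isdigit() and b.isdigit() for a, b in zip(w, w[1:])):
--             return False
--         return sum(c.isdigit() for c in w) <= 3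
--     return all(valid(w) for w in strParam.split(" "))
-- ===== Notes on version B (the rewrite author's own statement) =====
-- stated objective: simpler
-- what changed: A validates each word with one stateful loop (early returns plus a running digit counter checked mid-loop); B decomposes the check into two independent passes per word - an any() over adjacent pairs and a full digit count compared to 3 - and counts ALL digits, fixing A's off-by-one that never counts a word's last character.
-- intended difference: On strings where every word passes A's loop but some word ends in a digit and contains exactly 4 digits with none adjacent, A returns True (its zip over (s, s[1:]) never counts the last character), while B returns False; the task caps a word at 3 digits, so B's value is the intended one. — e.g. on StringChallenge("a1b2c3d4"): A returns true, B returns false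
import Mathlib
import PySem

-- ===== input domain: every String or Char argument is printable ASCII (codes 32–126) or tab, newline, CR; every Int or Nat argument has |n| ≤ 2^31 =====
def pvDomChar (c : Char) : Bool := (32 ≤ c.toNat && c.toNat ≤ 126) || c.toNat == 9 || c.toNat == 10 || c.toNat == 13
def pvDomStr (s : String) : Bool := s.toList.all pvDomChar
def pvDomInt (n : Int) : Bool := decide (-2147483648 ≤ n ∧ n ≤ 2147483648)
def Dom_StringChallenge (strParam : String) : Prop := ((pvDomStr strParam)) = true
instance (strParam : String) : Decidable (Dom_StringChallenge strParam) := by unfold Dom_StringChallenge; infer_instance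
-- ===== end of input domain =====

-- B validates each word by two separate passes (adjacent-digit test, then a full digit count ≤ 3)
-- instead of A's single stateful loop; B counts ALL digits of a word where A's loop misses the last
-- character, so the two intentionally differ on the D_ corner stated below.

-- ===== PORT A =====
-- the 'for a, b in zip(s, s[1:])' loop of check(s), with early returns and the 'digits' counter
def pvCheckLoop : List (Char × Char) → Int → Bool
  | [], _ => true
  | (a, b) :: rest, digits =>
    if PySem.Chars.isdigit a && PySem.Chars.isdigit b then false
    else
      let digits' := if PySem.Chars.isdigit a then digits + 1 else digits
      if digits' > 3 then false else pvCheckLoop rest digits'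

-- check(s)
def pvCheck (s : List Char) : Bool :=
  pvCheckLoop (s.zip (PySem.List.slice s (some 1) none)) 0

def StringChallenge (strParam : String) : Bool :=
  ((PySem.Str.split? strParam " ").getD []).all (fun w => pvCheck w.toList)

-- ===== PORT B =====
def pvValid (w : List Char) : Bool :=
  if (w.zip (PySem.List.slice w (some 1) none)).any
      (fun p => PySem.Chars.isdigit p.1 && PySem.Chars.isdigit p.2) then false
  else decide ((w.map (fun c => if PySem.Chars.isdigit c then (1 : Int) else 0)).sum ≤ 3)

def StringChallenge_alt (strParam : String) : Bool :=
  ((PySem.Str.split? strParam " ").getD []).all (fun w => pvValid w.toList)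

-- ===== PRECONDITION & SPEC =====
-- On strings whose every word passes A's check but where some word ends in a digit and holds exactly
-- 4 digits (none adjacent), A returns true because its loop never counts a word's last character,
-- while B returns false; the task caps a word at 3 digits, so B's value is the intended one.
def D_StringChallenge (strParam : String) : Prop :=
  (∀ w ∈ strParam.toList.splitOn ' ',
    w.IsChain (fun a b => ¬(PySem.Chars.isdigit a && PySem.Chars.isdigit b)) ∧
    w.dropLast.countP PySem.Chars.isdigit ≤ 3) ∧
  ∃ w ∈ strParam.toList.splitOn ' ',
    w.getLast?.any PySem.Chars.isdigit ∧ w.countP PySem.Chars.isdigit = 4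

instance (strParam : String) : Decidable (D_StringChallenge strParam) := by
  unfold D_StringChallenge; infer_instance

def Spec_StringChallenge (strParam : String) (out : Bool) : Prop :=
  ¬ D_StringChallenge strParam → out = StringChallenge_alt strParam

instance (strParam : String) (out : Bool) : Decidable (Spec_StringChallenge strParam out) := by
  unfold Spec_StringChallenge; infer_instance

def pvDiffWitness_StringChallenge : String := "a1b2c3d4"
def pvDiffWitnessOut_StringChallenge : Bool × Bool := (true, false)

-- ===== CLAIM (what is proved, stated in full; the proofs are below) =====
def Claim_unchanged_StringChallenge : Prop :=
  ∀ (strParam : String), Dom_StringChallenge strParam →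
    Spec_StringChallenge strParam (StringChallenge strParam)

def Claim_changed_StringChallenge : Prop :=
  Dom_StringChallenge (pvDiffWitness_StringChallenge) ∧
  D_StringChallenge (pvDiffWitness_StringChallenge) ∧
  StringChallenge (pvDiffWitness_StringChallenge) = pvDiffWitnessOut_StringChallenge.1 ∧
  StringChallenge_alt (pvDiffWitness_StringChallenge) = pvDiffWitnessOut_StringChallenge.2 ∧
  pvDiffWitnessOut_StringChallenge.1 ≠ pvDiffWitnessOut_StringChallenge.2

def Claim_exact_StringChallenge : Prop :=
  ∀ (strParam : String), Dom_StringChallenge strParam → D_StringChallenge strParam →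
    StringChallenge strParam ≠ StringChallenge_alt strParam

-- ===== LEMMAS AND PROOFS =====

-- proof-side splitter: the common shape of PySem.Chars.splitOn.go and List.splitOnP.go at sep ' '
def pvWordsGo : List Char → List Char → List (List Char)
  | [], cur => [cur.reverse]
  | c :: rest, cur => if c = ' ' then cur.reverse :: pvWordsGo rest [] else pvWordsGo rest (c :: cur)

lemma pvGo_eq : ∀ (fuel : Nat) (l cur : List Char) (acc : List (List Char)), l.length < fuel →
    PySem.Chars.splitOn.go [' '] fuel l cur acc = acc.reverse ++ pvWordsGo l cur := by
  intro fuel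
  induction fuel with
  | zero => intro l cur acc h; omega
  | succ n ih =>
    intro l cur acc h
    cases l with
    | nil => simp [PySem.Chars.splitOn.go, pvWordsGo]
    | cons c rest =>
      by_cases hc : c = ' '
      · rw [show PySem.Chars.splitOn.go [' '] (n + 1) (c :: rest) cur acc
            = PySem.Chars.splitOn.go [' '] n rest [] (cur.reverse :: acc) from by
          simp [PySem.Chars.splitOn.go, List.isPrefixOf, hc]]
        rw [ih rest [] _ (by simp at h; omega)]
        simp [pvWordsGo, hc]
      · have hc' : ¬ (' ' = c) := fun h => hc h.symm
        rw [show PySem.Chars.splitOn.go [' '] (n + 1) (c :: rest) cur acc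
            = PySem.Chars.splitOn.go [' '] n rest (c :: cur) acc from by
          simp [PySem.Chars.splitOn.go, List.isPrefixOf, hc']]
        rw [ih rest (c :: cur) _ (by simp at h; omega)]
        simp [pvWordsGo, hc]

lemma pvCoreGo_eq (l : List Char) : ∀ cur : List Char,
    List.splitOnP.go (fun x => x == ' ') l cur = pvWordsGo l cur := by
  induction l with
  | nil => intro cur; rfl
  | cons c rest ih =>
    intro cur
    by_cases hc : c = ' ' <;> simp [List.splitOnP.go, pvWordsGo, hc, ih]

lemma pvWords_eq (s : String) :
    ((PySem.Str.split? s " ").getD []).map String.toList = s.toList.splitOn ' ' := by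
  have hsep : (" " : String).toList = [' '] := by decide
  rw [PySem.Str.split?, PySem.Chars.split?, hsep]
  simp only [List.isEmpty_cons]
  have h1 : PySem.Chars.splitOn s.toList [' '] = pvWordsGo s.toList [] := by
    rw [PySem.Chars.splitOn, pvGo_eq (s.toList.length + 1) _ _ _ (by omega)]
    rfl
  rw [if_neg (by simp), h1, List.splitOn, List.splitOnP, pvCoreGo_eq]
  simp [Function.comp_def]

lemma pvChain_iff (l : List Char) :
    (l.zip l.tail).any (fun p => PySem.Chars.isdigit p.1 && PySem.Chars.isdigit p.2) = false ↔
      l.IsChain (fun a b => ¬(PySem.Chars.isdigit a && PySem.Chars.isdigit b)) := by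
  induction l with
  | nil => simp
  | cons a t ih =>
    cases t with
    | nil => simp
    | cons b r =>
      simp only [List.tail_cons, List.zip_cons_cons, List.any_cons, List.isChain_cons,
        List.head?_cons, Option.mem_def, Option.some.injEq, forall_eq',
        Bool.or_eq_false_iff, Bool.and_eq_false_iff, Bool.not_eq_true] at *
      rw [ih]

lemma pvCheckLoop_eq (pairs : List (Char × Char)) : ∀ d : Int, 0 ≤ d → d ≤ 3 →
    pvCheckLoop pairs d =
      (!pairs.any (fun p => PySem.Chars.isdigit p.1 && PySem.Chars.isdigit p.2) &&
       decide (d + (pairs.countP (fun p => PySem.Chars.isdigit p.1) : Int) ≤ 3)) := by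
  induction pairs with
  | nil =>
    intro d h0 h3
    simp [pvCheckLoop]
    omega
  | cons p rest ih =>
    intro d h0 h3
    obtain ⟨a, b⟩ := p
    by_cases h1 : (PySem.Chars.isdigit a && PySem.Chars.isdigit b) = true
    · simp [pvCheckLoop, h1]
    · by_cases h2 : PySem.Chars.isdigit a = true
      · by_cases h4 : d + 1 > 3
        · have hd : d = 3 := by omega
          simp [pvCheckLoop, h2, hd]
        · have hstep : pvCheckLoop ((a, b) :: rest) d = pvCheckLoop rest (d + 1) := by
            simp only [pvCheckLoop]
            rw [if_neg h1, if_pos h2, if_neg h4]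
          rw [hstep, ih (d + 1) (by omega) (by omega)]
          have h1' : PySem.Chars.isdigit b = false := by
            cases hb : PySem.Chars.isdigit b
            · rfl
            · exact absurd (by simp [h2, hb]) h1
          have e1 : (((a, b) :: rest).any (fun p => PySem.Chars.isdigit p.1 && PySem.Chars.isdigit p.2))
              = rest.any (fun p => PySem.Chars.isdigit p.1 && PySem.Chars.isdigit p.2) := by
            simp [h1']
          have e2 : List.countP (fun p => PySem.Chars.isdigit p.1) ((a, b) :: rest)
              = List.countP (fun p => PySem.Chars.isdigit p.1) rest + 1 := by
            simp [h2]
          rw [e1, e2]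
          congr 1
          rw [decide_eq_decide]
          push_cast
          omega
      · have h4 : ¬ d > 3 := by omega
        rw [show pvCheckLoop ((a, b) :: rest) d = pvCheckLoop rest d from by
          simp [pvCheckLoop, h2, h4]]
        rw [ih d h0 h3]
        have h2' : PySem.Chars.isdigit a = false := by
          cases hb : PySem.Chars.isdigit a <;> simp_all
        simp [h2']

lemma pvCountFst_eq (l : List Char) :
    (l.zip l.tail).countP (fun p => PySem.Chars.isdigit p.1) =
      l.dropLast.countP PySem.Chars.isdigit := by
  induction l with
  | nil => rfl
  | cons a t ih =>
    cases t with
    | nil => rfl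
    | cons b r =>
      simp only [List.tail_cons, List.zip_cons_cons, List.countP_cons, List.dropLast_cons₂] at *
      rw [ih]

lemma pvCount_last (l : List Char) :
    l.countP PySem.Chars.isdigit =
      l.dropLast.countP PySem.Chars.isdigit +
        (if l.getLast?.any PySem.Chars.isdigit then 1 else 0) := by
  induction l using List.reverseRecOn with
  | nil => rfl
  | append_singleton t a _ =>
    simp [List.countP_append, List.countP_singleton, Option.any]

lemma pvCheck_eq (w : List Char) :
    pvCheck w = (!(w.zip w.tail).any (fun p => PySem.Chars.isdigit p.1 && PySem.Chars.isdigit p.2)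
      && decide (w.dropLast.countP PySem.Chars.isdigit ≤ 3)) := by
  rw [pvCheck, PySem.List.slice_from_one,
    pvCheckLoop_eq _ 0 (by omega) (by omega), pvCountFst_eq]
  congr 1
  rw [decide_eq_decide]
  omega

lemma pvValid_eq (w : List Char) :
    pvValid w = (!(w.zip w.tail).any (fun p => PySem.Chars.isdigit p.1 && PySem.Chars.isdigit p.2)
      && decide (w.countP PySem.Chars.isdigit ≤ 3)) := by
  rw [pvValid, PySem.List.slice_from_one, PySem.List.sum_map_ite_one_zero]
  cases hb : (w.zip w.tail).any (fun p => PySem.Chars.isdigit p.1 && PySem.Chars.isdigit p.2)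
  · simp only [Bool.false_eq_true, if_false, Bool.not_false, Bool.true_and]
    rw [decide_eq_decide]
    omega
  · simp

lemma pvValid_imp_check (w : List Char) (h : pvValid w = true) : pvCheck w = true := by
  rw [pvValid_eq] at h
  rw [pvCheck_eq]
  simp only [Bool.and_eq_true, Bool.not_eq_true', decide_eq_true_eq] at h ⊢
  refine ⟨h.1, ?_⟩
  have hsub := List.Sublist.countP_le (p := PySem.Chars.isdigit) (List.dropLast_sublist w)
  omega

lemma pvA_words (s : String) :
    StringChallenge s = (s.toList.splitOn ' ').all (fun w => pvCheck w) := by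
  rw [StringChallenge, ← pvWords_eq, List.all_map]
  rfl

lemma pvB_words (s : String) :
    StringChallenge_alt s = (s.toList.splitOn ' ').all (fun w => pvValid w) := by
  rw [StringChallenge_alt, ← pvWords_eq, List.all_map]
  rfl

-- pvCheck w = true exactly when w satisfies D_'s per-word condition for A
lemma pvCheck_iff (w : List Char) :
    pvCheck w = true ↔
      (w.IsChain (fun a b => ¬(PySem.Chars.isdigit a && PySem.Chars.isdigit b)) ∧
       w.dropLast.countP PySem.Chars.isdigit ≤ 3) := by
  rw [pvCheck_eq, Bool.and_eq_true, Bool.not_eq_true', decide_eq_true_eq, pvChain_iff]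

-- ===== VERDICT (by name: the statement is the Claim_ definition above) =====
theorem StringChallenge_spec : Claim_unchanged_StringChallenge := by
  intro s _ hnd
  rw [pvA_words, pvB_words]
  by_cases hall : ∀ w ∈ s.toList.splitOn ' ', pvCheck w = true
  · have hA : (s.toList.splitOn ' ').all (fun w => pvCheck w) = true := List.all_eq_true.mpr hall
    rw [hA]
    by_cases hb : ∀ w ∈ s.toList.splitOn ' ', pvValid w = true
    · exact (List.all_eq_true.mpr hb).symm
    · exfalso
      apply hnd
      push Not at hb
      obtain ⟨w, hw, hwv⟩ := hb
      have hPA : ∀ u ∈ s.toList.splitOn ' ',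
          u.IsChain (fun a b => ¬(PySem.Chars.isdigit a && PySem.Chars.isdigit b)) ∧
          u.dropLast.countP PySem.Chars.isdigit ≤ 3 :=
        fun u hu => (pvCheck_iff u).mp (hall u hu)
      refine ⟨hPA, w, hw, ?_⟩
      have hP := hPA w hw
      have hnoadj : (w.zip w.tail).any
          (fun p => PySem.Chars.isdigit p.1 && PySem.Chars.isdigit p.2) = false :=
        (pvChain_iff w).mpr hP.1
      have hc4 : 3 < w.countP PySem.Chars.isdigit := by
        by_contra hc
        push Not at hc
        exact hwv (by rw [pvValid_eq, hnoadj]; simp [hc])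
      have hlast := pvCount_last w
      by_cases hld : w.getLast?.any PySem.Chars.isdigit = true
      · rw [if_pos hld] at hlast
        exact ⟨hld, by omega⟩
      · rw [if_neg hld] at hlast
        omega
  · push Not at hall
    obtain ⟨w, hw, hwc⟩ := hall
    have hA : (s.toList.splitOn ' ').all (fun w => pvCheck w) = false := by
      rw [List.all_eq_false]
      exact ⟨w, hw, by simp [hwc]⟩
    have hB : (s.toList.splitOn ' ').all (fun w => pvValid w) = false := by
      rw [List.all_eq_false]
      refine ⟨w, hw, ?_⟩
      intro hv
      exact hwc (pvValid_imp_check w hv)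
    rw [hA, hB]

theorem StringChallenge_changed : Claim_changed_StringChallenge := by
  unfold Claim_changed_StringChallenge; decide

theorem StringChallenge_tight : Claim_exact_StringChallenge := by
  intro s _ hd
  obtain ⟨hall, w, hw, hld, hc4⟩ := hd
  have hA : StringChallenge s = true := by
    rw [pvA_words]
    exact List.all_eq_true.mpr fun u hu => (pvCheck_iff u).mpr (hall u hu)
  have hB : StringChallenge_alt s = false := by
    rw [pvB_words, List.all_eq_false]
    refine ⟨w, hw, ?_⟩
    rw [pvValid_eq]
    simp [hc4]
  rw [hA, hB]
  simp
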